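-- pv_equiv track=rewrite | github.com/RideGreg/LeetCode | Python/uber.py | numberSigningSum
-- ===== SOURCE A (Python) =====
-- def numberSigningSum(n):
--     ans = 0
--     digitCnt = len(str(n))
--     sign = 1 if digitCnt % 2 == 1 else -1
--     while n:
--         n, v = divmod(n, 10)
--         ans += v * sign
--         sign *= -1
--     return ans
-- ===== SOURCE B (Python) =====
-- def numberSigningSum(n):
--     ans, sign = 0, 1
--     for c in str(n):
--         ans += int(c) * sign
--         sign = -sign
--     return ans
-- ===== Notes on version B (the rewrite author's own statement) =====
-- stated objective: simpler
-- what changed: B walks the decimal string left-to-right with a single flipping sign that starts positive, replacing A's right-to-left divmod extraction and its up-front digit-count parity computation.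
import Mathlib
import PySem

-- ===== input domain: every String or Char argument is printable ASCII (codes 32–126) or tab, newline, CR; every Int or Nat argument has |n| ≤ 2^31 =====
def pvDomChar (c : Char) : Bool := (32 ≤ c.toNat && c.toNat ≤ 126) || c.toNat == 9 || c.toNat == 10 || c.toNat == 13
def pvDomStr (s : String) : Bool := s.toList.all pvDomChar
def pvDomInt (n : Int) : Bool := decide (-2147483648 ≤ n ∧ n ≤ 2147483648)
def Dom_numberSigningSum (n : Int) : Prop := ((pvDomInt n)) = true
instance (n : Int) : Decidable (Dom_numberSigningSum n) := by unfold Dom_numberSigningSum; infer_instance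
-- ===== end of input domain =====

-- B walks str(n) left-to-right with a flipping sign that starts positive, replacing A's
-- right-to-left divmod loop and its digit-count parity computation (equal on n ≥ 0;
-- A loops forever on negative n, which Pre_ excludes).


-- ===== PORT A =====
-- the 'while n:' loop; fuel n.toNat+1 only makes the recursion total (≥ iteration count for n ≥ 0)
def pvALoop : Nat → Int → Int → Int → Int
  | 0, _, ans, _ => ans
  | fuel + 1, n, ans, sign =>
      if n ≠ 0 then
        pvALoop fuel (PySem.Int.floordiv n 10) (ans + PySem.Int.mod n 10 * sign) (-sign)
      else ans

def numberSigningSum (n : Int) : Int :=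
  let digitCnt := PySem.Str.len (PySem.Int.toStr n)
  let sign : Int := if PySem.Int.mod digitCnt 2 == 1 then 1 else -1
  pvALoop (n.toNat + 1) n 0 sign

-- ===== PORT B =====
def numberSigningSum_alt (n : Int) : Int :=
  ((PySem.Int.toStr n).toList.foldl
    (fun (p : Int × Int) c => (p.1 + (PySem.Int.ofChars? [c]).getD 0 * p.2, -p.2)) (0, 1)).1

-- ===== PRECONDITION & SPEC =====
-- A's 'while n: n, v = divmod(n, 10)' never terminates for negative n (n stays -1), so Pre_ keeps n ≥ 0.
def Pre_numberSigningSum (n : Int) : Prop := 0 ≤ n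
instance (n : Int) : Decidable (Pre_numberSigningSum n) := by unfold Pre_numberSigningSum; infer_instance
def pvWitness_numberSigningSum : Int := (12345)

def Spec_numberSigningSum (n : Int) (out : Int) : Prop := out = numberSigningSum_alt n
instance (n : Int) (out : Int) : Decidable (Spec_numberSigningSum n out) := by unfold Spec_numberSigningSum; infer_instance

-- ===== CLAIM (what is proved, stated in full; the proofs are below) =====
def Claim_equal_numberSigningSum : Prop := ∀ (n : Int), Dom_numberSigningSum n → Pre_numberSigningSum n → Spec_numberSigningSum n (numberSigningSum n)

-- ===== LEMMAS AND PROOFS =====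

-- LSB-first alternating sum with starting sign s
def pvS : List Int → Int → Int
  | [], _ => 0
  | d :: t, s => d * s + pvS t (-s)

theorem pvS_smul (l : List Int) : ∀ c : Int, pvS l c = c * pvS l 1 := by
  induction l with
  | nil => intro c; simp [pvS]
  | cons d t ih => intro c; simp [pvS, ih (-c), ih (-1)]; ring

theorem pvS_append (a b : List Int) : ∀ s : Int, pvS (a ++ b) s = pvS a s + pvS b ((-1) ^ a.length * s) := by
  induction a with
  | nil => intro s; simp [pvS]
  | cons d t ih =>
      intro s
      simp [pvS, ih (-s), List.length_cons, pow_succ]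
      ring

theorem pvS_reverse (l : List Int) : pvS l.reverse 1 = (-1) ^ (l.length + 1) * pvS l 1 := by
  induction l with
  | nil => simp [pvS]
  | cons d t ih =>
      have : (d :: t).reverse = t.reverse ++ [d] := by simp
      rw [this, pvS_append, ih]
      simp [pvS, pvS_smul t (-1), List.length_reverse, pow_succ]
      ring

-- A's loop computes the alternating sum over Nat.digits 10 m
theorem pvALoop_digits : ∀ (fuel : Nat) (m : Nat), m < fuel → ∀ (ans sign : Int),
    pvALoop fuel (m : Int) ans sign = ans + pvS ((Nat.digits 10 m).map (Int.ofNat)) sign := by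
  intro fuel
  induction fuel with
  | zero => intro m h; omega
  | succ f ih =>
      intro m h ans sign
      by_cases hm : m = 0
      · subst hm; simp [pvALoop, pvS]
      · have hm0 : 0 < m := Nat.pos_of_ne_zero hm
        have hcast : ((m : Int) ≠ 0) := by exact_mod_cast hm
        rw [pvALoop]
        simp only [hcast, if_pos, ne_eq, not_false_eq_true]
        have h10 : (10 : Int) = ((10 : Nat) : Int) := rfl
        rw [h10, PySem.Int.floordiv_natCast m 10, PySem.Int.mod_natCast m 10]
        rw [ih (m / 10) (by omega)]
        rw [Nat.digits_def' (by norm_num) hm0]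
        simp [pvS]
        ring

-- core's toDigitsCore in terms of Nat.digits (positive n, enough fuel)
theorem pvToDigitsCore_eq : ∀ (fuel n : Nat), 0 < n → n < fuel → ∀ (acc : List Char),
    Nat.toDigitsCore 10 fuel n acc = ((Nat.digits 10 n).map Nat.digitChar).reverse ++ acc := by
  intro fuel
  induction fuel with
  | zero => intro n h0 h; omega
  | succ f ih =>
      intro n h0 h acc
      rw [Nat.toDigitsCore]
      by_cases hq : n / 10 = 0
      · simp only [hq, if_pos]
        rw [Nat.digits_def' (by norm_num) h0, hq]
        simp
      · simp only [hq, if_neg, not_false_eq_true]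
        rw [ih (n / 10) (Nat.pos_of_ne_zero hq) (by omega)]
        rw [Nat.digits_def' (by norm_num) h0]
        simp

theorem pvToDigits_eq (n : Nat) (h : 0 < n) :
    Nat.toDigits 10 n = ((Nat.digits 10 n).map Nat.digitChar).reverse := by
  rw [Nat.toDigits, pvToDigitsCore_eq (n + 1) n h (by omega)]
  simp

-- converting back a digit character
theorem pvConv_digitChar (d : Nat) (hd : d < 10) :
    (PySem.Int.ofChars? [Nat.digitChar d]).getD 0 = (d : Int) := by
  interval_cases d <;> decide

-- B's fold computes the MSB-first alternating sum starting at +1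
theorem pvBFold (cs : List Char) : ∀ (a s : Int),
    (cs.foldl (fun (p : Int × Int) c => (p.1 + (PySem.Int.ofChars? [c]).getD 0 * p.2, -p.2)) (a, s)).1
      = a + pvS (cs.map (fun c => (PySem.Int.ofChars? [c]).getD 0)) s := by
  induction cs with
  | nil => intro a s; simp [pvS]
  | cons c t ih =>
      intro a s
      simp only [List.foldl_cons, List.map_cons, pvS]
      rw [ih]
      ring

-- ===== VERDICT (by name: the statement is the Claim_ definition above) =====
theorem numberSigningSum_spec : Claim_equal_numberSigningSum := by
  intro n _ hpre
  unfold Spec_numberSigningSum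
  obtain ⟨m, rfl⟩ := Int.eq_ofNat_of_zero_le hpre
  by_cases hm : m = 0
  · subst hm; decide
  · have hm0 : 0 < m := Nat.pos_of_ne_zero hm
    have hchars : (PySem.Int.toStr (m : Int)).toList = ((Nat.digits 10 m).map Nat.digitChar).reverse := by
      rw [PySem.Int.toList_toStr, PySem.Int.toChars]
      have hneg : ¬ ((m : Int) < 0) := Int.not_lt.mpr (Int.natCast_nonneg m)
      simp only [hneg, if_neg, not_false_eq_true, Int.toNat_natCast]
      exact pvToDigits_eq m hm0
    have hlen : PySem.Str.len (PySem.Int.toStr (m : Int)) = ((Nat.digits 10 m).length : Int) := by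
      rw [PySem.Str.len_eq, hchars]; simp
    -- B's value
    unfold numberSigningSum_alt
    rw [pvBFold, hchars, ← List.map_reverse, List.map_map]
    have hmapconv : ((Nat.digits 10 m).reverse.map ((fun c => (PySem.Int.ofChars? [c]).getD 0) ∘ Nat.digitChar))
        = ((Nat.digits 10 m).map (Int.ofNat)).reverse := by
      rw [← List.map_reverse]
      apply List.map_congr_left
      intro d hd
      have hd10 : d < 10 := Nat.digits_lt_base (by norm_num) (List.mem_reverse.mp hd)
      simpa using pvConv_digitChar d hd10
    rw [hmapconv]
    -- A's value
    unfold numberSigningSum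
    simp only [Int.toNat_natCast]
    rw [pvALoop_digits (m + 1) m (by omega)]
    rw [pvS_reverse ((Nat.digits 10 m).map (Int.ofNat))]
    -- reconcile the two starting signs
    rcases Nat.even_or_odd (Nat.digits 10 m).length with hpar | hpar
    · have h2 : PySem.Int.mod (PySem.Str.len (PySem.Int.toStr (m : Int))) 2 = 0 := by
        rw [hlen, PySem.Int.mod_eq_emod_of_pos (by norm_num)]
        obtain ⟨k, hk⟩ := hpar
        rw [hk]; push_cast; omega
      have hpow : ((-1 : Int)) ^ (((Nat.digits 10 m).map (Int.ofNat)).length + 1) = -1 := by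
        have hE : Even (((Nat.digits 10 m).map (Int.ofNat)).length) := by simpa using hpar
        rw [pow_succ, hE.neg_one_pow]; ring
      rw [h2, hpow]
      norm_num
      rw [pvS_smul _ (-1)]
      ring
    · have h2 : PySem.Int.mod (PySem.Str.len (PySem.Int.toStr (m : Int))) 2 = 1 := by
        rw [hlen, PySem.Int.mod_eq_emod_of_pos (by norm_num)]
        obtain ⟨k, hk⟩ := hpar
        rw [hk]; push_cast; omega
      have hpow : ((-1 : Int)) ^ (((Nat.digits 10 m).map (Int.ofNat)).length + 1) = 1 := by
        have hE : Even (((Nat.digits 10 m).map (Int.ofNat)).length + 1) := by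
          obtain ⟨k, hk⟩ := hpar
          exact ⟨k + 1, by simp [hk]; omega⟩
        exact hE.neg_one_pow
      rw [h2, hpow]
      simp
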